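-- pv_equiv track=rewrite | github.com/klimarichard/project_euler | src/problems_26-50/36_double-base_palindromes.py | find_double_based_palindromes
-- ===== SOURCE A (Python) =====
-- def find_double_based_palindromes(n):
--     """
--     Find double-based palindromes in given range.
--     :param n: upper bound
--     :return: list of all double-based palindromes
--     """
--     dbp = []
--
--     for i in range(n):
--         if i % 10 == 0:
--             continue
--         if palindrome(i):
--             if palindrome(bin(i)[2:]):
--                 dbp.append(i)
--
--     return dbp
--
-- def palindrome(n):
--     """
--     Finds, if given number is palindromic (with no leading zeros).
--     :param n: an integer (in any base)
--     :return: True, if given number is palindromic, False, otherwise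
--     """
--     if str(n) == "".join(reversed(str(n))):
--         return True
--     else:
--         return False
-- ===== SOURCE B (Python) =====
-- def find_double_based_palindromes(n):
--     """
--     Find double-based palindromes in given range.
--     :param n: upper bound
--     :return: list of all double-based palindromes
--     """
--     res = []
--     d = 1
--     while 10 ** (d - 1) < n:  # there can still be a d-digit palindrome below n
--         h = (d + 1) // 2      # length of the constructing half (middle digit included)
--         shift = 10 ** (d // 2)
--         for half in range(10 ** (h - 1), 10 ** h):
--             # mirror the half arithmetically (middle digit not repeated when d is odd)
--             t = half // 10 if d % 2 else half
--             m = 0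
--             while t:
--                 m = 10 * m + t % 10
--                 t //= 10
--             p = half * shift + m
--             if p >= n:
--                 break
--             # binary palindrome test by arithmetic bit reversal
--             q = p
--             r = 0
--             while q:
--                 r = 2 * r + q % 2
--                 q //= 2
--             if r == p:
--                 res.append(p)
--         d += 1
--     return res
-- ===== Notes on version B (the rewrite author's own statement) =====
-- stated objective: faster
-- what changed: Instead of scanning every i < n and string-testing each for decimal palindromicity, B constructs the decimal palindromes directly from their halves by pure arithmetic (digit mirroring, no string conversion) and tests only those few candidates for binary palindromicity by arithmetic bit reversal.
import Mathlib
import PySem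

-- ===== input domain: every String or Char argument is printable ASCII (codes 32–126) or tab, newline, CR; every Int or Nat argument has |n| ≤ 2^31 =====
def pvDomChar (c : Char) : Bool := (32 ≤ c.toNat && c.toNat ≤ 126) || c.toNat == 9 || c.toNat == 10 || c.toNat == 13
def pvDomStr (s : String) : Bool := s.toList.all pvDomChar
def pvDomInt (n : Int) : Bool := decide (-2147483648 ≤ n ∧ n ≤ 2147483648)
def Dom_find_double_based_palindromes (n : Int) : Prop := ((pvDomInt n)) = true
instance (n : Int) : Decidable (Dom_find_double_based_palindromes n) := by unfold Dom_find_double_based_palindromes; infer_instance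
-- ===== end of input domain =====

-- B replaces A's scan of every i < n (string-palindrome test on each) by direct arithmetic
-- construction of the decimal palindromes from their halves; measured faster (asymptotically
-- fewer candidates: only the palindromes are ever produced).

-- ===== PORT A =====
-- helper `palindrome(x)`: str(x) == "".join(reversed(str(x))).  A calls it on an int i
-- (str(i) = PySem.Int.toChars i) and on the string bin(i)[2:] (str of a str is the str itself);
-- "".join(reversed(s)) is the reversed character list.
def pvPalindrome (cs : List Char) : Bool := cs == cs.reverse

def find_double_based_palindromes (n : Int) : List Int :=
  (PySem.List.pyRange 0 n 1).foldl
    (fun dbp i =>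
      if PySem.Int.mod i 10 == 0 then dbp
      else
        if pvPalindrome (PySem.Int.toChars i) then
          -- bin(i)[2:] : the slice [2:] of bin(i) drops the first two characters
          if pvPalindrome ((PySem.Int.toBinChars0b i).drop 2) then dbp ++ [i] else dbp
        else dbp)
    []

-- ===== PORT B =====
-- All loop-local values in Source B are nonnegative integers, so they are carried as Nat;
-- the returned Python ints become Int by the final cast.

-- while t: m = 10 * m + t % 10; t //= 10
def pvRev10 (t m : Nat) : Nat :=
  if h : t = 0 then m else pvRev10 (t / 10) (10 * m + t % 10)
decreasing_by exact Nat.div_lt_self (Nat.pos_of_ne_zero h) (by norm_num)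

-- while q: r = 2 * r + q % 2; q //= 2
def pvRev2 (q r : Nat) : Nat :=
  if h : q = 0 then r else pvRev2 (q / 2) (2 * r + q % 2)
decreasing_by exact Nat.div_lt_self (Nat.pos_of_ne_zero h) (by norm_num)

-- the body of `for half in range(...)` with its two `if`s and the `break`
def pvInner (n d : Nat) (halves : List Nat) (res : List Nat) : List Nat :=
  match halves with
  | [] => res
  | half :: rest =>
    let t := if d % 2 = 1 then half / 10 else half
    let p := half * 10 ^ (d / 2) + pvRev10 t 0
    if n ≤ p then res                                   -- break
    else if pvRev2 p 0 == p then pvInner n d rest (res ++ [p])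
    else pvInner n d rest res

-- while 10 ** (d - 1) < n:  (h = (d+1)//2 inlined; range(a, b) is the Nat list range' a (b-a))
def pvOuter (n d : Nat) (res : List Nat) : List Nat :=
  if h : 10 ^ (d - 1) < n then
    pvOuter n (d + 1)
      (pvInner n d
        (List.range' (10 ^ ((d + 1) / 2 - 1)) (10 ^ ((d + 1) / 2) - 10 ^ ((d + 1) / 2 - 1)))
        res)
  else res
termination_by n + 1 - d
decreasing_by
  have hd : d - 1 < 10 ^ (d - 1) := Nat.lt_pow_self (by norm_num)
  omega

def find_double_based_palindromes_alt (n : Int) : List Int :=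
  (pvOuter n.toNat 1 []).map (fun m : Nat => (m : Int))

-- ===== PRECONDITION & SPEC =====
def Spec_find_double_based_palindromes (n : Int) (out : List Int) : Prop := out = find_double_based_palindromes_alt n
instance (n : Int) (out : List Int) : Decidable (Spec_find_double_based_palindromes n out) := by unfold Spec_find_double_based_palindromes; infer_instance

-- ===== CLAIM (what is proved, stated in full; the proofs are below) =====
def Claim_equal_find_double_based_palindromes : Prop := ∀ (n : Int), Dom_find_double_based_palindromes n → Spec_find_double_based_palindromes n (find_double_based_palindromes n)

-- ===== LEMMAS AND PROOFS =====

-- the common arithmetic description of the kept numbers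
def pvGood (m : Nat) : Bool :=
  decide (m % 10 ≠ 0 ∧ (Nat.digits 10 m).reverse = Nat.digits 10 m ∧
          (Nat.digits 2 m).reverse = Nat.digits 2 m)

-- the palindrome B builds from `half` for digit count d
def pvPalOf (d half : Nat) : Nat :=
  half * 10 ^ (d / 2) + Nat.ofDigits 10 (Nat.digits 10 (half / 10 ^ (d % 2))).reverse

-- the list of numbers one pass of B's inner loop appends
def pvBlock (n d : Nat) : List Nat :=
  ((List.range' (10 ^ ((d + 1) / 2 - 1)) (10 ^ ((d + 1) / 2) - 10 ^ ((d + 1) / 2 - 1))).filter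
      (fun a => decide (pvPalOf d a < n) && (pvRev2 (pvPalOf d a) 0 == pvPalOf d a))).map
    (pvPalOf d)

-- ---- A-side: Nat.toDigits versus Nat.digits ----
lemma pvToDigitsCore_eq (b : Nat) (hb : 2 ≤ b) :
    ∀ fuel n ds, n ≠ 0 → n < fuel →
      Nat.toDigitsCore b fuel n ds = ((Nat.digits b n).map Nat.digitChar).reverse ++ ds := by
  intro fuel
  induction fuel with
  | zero => intro n ds _ h; omega
  | succ f ih =>
    intro n ds hn hfuel
    rw [Nat.toDigitsCore]
    have hb1 : 1 < b := hb
    have hpos : 0 < n := Nat.pos_of_ne_zero hn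
    rw [Nat.digits_def' hb1 hpos]
    by_cases hq : n / b = 0
    · simp [hq, Nat.digits_zero]
    · have hlt : n / b < f := lt_of_lt_of_le (Nat.div_lt_self hpos hb) (by omega)
      simp only [hq, if_false]
      rw [ih (n / b) _ hq hlt]
      simp

lemma pvToDigits_eq (b m : Nat) (hb : 2 ≤ b) (hm : m ≠ 0) :
    Nat.toDigits b m = ((Nat.digits b m).map Nat.digitChar).reverse := by
  have : m < m + 1 := Nat.lt_succ_self m
  rw [Nat.toDigits, pvToDigitsCore_eq b hb (m + 1) m [] hm this, List.append_nil]

lemma pvDigitChar_inj {a c : Nat} (ha : a < 10) (hc : c < 10)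
    (h : Nat.digitChar a = Nat.digitChar c) : a = c := by
  interval_cases a <;> interval_cases c <;>
    first
      | rfl
      | exact absurd h (by decide)

lemma pvMapDigitChar_inj : ∀ {L₁ L₂ : List Nat}, (∀ x ∈ L₁, x < 10) → (∀ x ∈ L₂, x < 10) →
    L₁.map Nat.digitChar = L₂.map Nat.digitChar → L₁ = L₂ := by
  intro L₁
  induction L₁ with
  | nil => intro L₂ _ _ h; cases L₂ <;> simp_all
  | cons a t ih =>
    intro L₂ h₁ h₂ h
    cases L₂ with
    | nil => simp_all
    | cons c t₂ =>
      simp only [List.map_cons, List.cons.injEq] at h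
      have ha : a = c := pvDigitChar_inj (h₁ a (by simp)) (h₂ c (by simp)) h.1
      have ht : t = t₂ := ih (fun x hx => h₁ x (by simp [hx])) (fun x hx => h₂ x (by simp [hx])) h.2
      rw [ha, ht]

lemma pvPal_toDigits {b m : Nat} (hb : 2 ≤ b) (hb' : b ≤ 10) (hm : m ≠ 0) :
    pvPalindrome (Nat.toDigits b m) = decide ((Nat.digits b m).reverse = Nat.digits b m) := by
  have hb1 : 1 < b := hb
  have hdig : ∀ x ∈ Nat.digits b m, x < 10 :=
    fun x hx => lt_of_lt_of_le (Nat.digits_lt_base hb1 hx) hb'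
  rw [pvPalindrome, pvToDigits_eq b m hb hm]
  rw [Bool.eq_iff_iff]
  simp only [beq_iff_eq, decide_eq_true_eq, List.reverse_reverse]
  constructor
  · intro h
    have h' : List.map Nat.digitChar (Nat.digits b m).reverse
        = List.map Nat.digitChar (Nat.digits b m) := by
      rw [List.map_reverse]; exact h
    exact pvMapDigitChar_inj (fun x hx => hdig x (List.mem_reverse.mp hx)) hdig h'
  · intro h; rw [← List.map_reverse, h]

lemma pvA_eq (n : Int) :
    find_double_based_palindromes n =
      ((List.range n.toNat).filter pvGood).map (fun m : Nat => (m : Int)) := by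
  have hrange : PySem.List.pyRange 0 n 1
      = (List.range n.toNat).map (fun k : Nat => (k : Int)) := by
    by_cases hn : 0 ≤ n
    · conv_lhs => rw [show n = ((n.toNat : Nat) : Int) from (Int.toNat_of_nonneg hn).symm]
      exact PySem.List.pyRange_zero_natCast n.toNat
    · have h0 : n.toNat = 0 := Int.toNat_of_nonpos (by omega)
      rw [h0]
      simp only [List.range_zero, List.map_nil]
      apply List.eq_nil_iff_forall_not_mem.mpr
      intro x hx
      rw [PySem.List.mem_pyRange_one] at hx
      omega
  rw [find_double_based_palindromes, hrange, List.foldl_map]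
  have hbody : (fun (acc : List Int) (k : Nat) =>
      if PySem.Int.mod (k : Int) 10 == 0 then acc
      else
        if pvPalindrome (PySem.Int.toChars (k : Int)) then
          if pvPalindrome ((PySem.Int.toBinChars0b (k : Int)).drop 2) then acc ++ [(k : Int)]
          else acc
        else acc)
      = fun acc k => if pvGood k then acc ++ [(fun m : Nat => (m : Int)) k] else acc := by
    funext acc k
    have hmod : (PySem.Int.mod (k : Int) 10 == 0) = decide (k % 10 = 0) := by
      rw [PySem.Int.mod_eq_emod_of_pos (by norm_num), Bool.eq_iff_iff]
      simp only [beq_iff_eq, decide_eq_true_eq]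
      omega
    have hchars : PySem.Int.toChars (k : Int) = Nat.toDigits 10 k := by
      simp [PySem.Int.toChars]
    have hbin : (PySem.Int.toBinChars0b (k : Int)).drop 2 = Nat.toDigits 2 k := by
      rw [PySem.Int.toBinChars0b, if_neg (by omega)]
      simp
    rw [hmod, hchars, hbin]
    rcases eq_or_ne k 0 with rfl | hk
    · simp [pvGood]
    · rw [pvPal_toDigits (by norm_num) (by norm_num) hk,
        pvPal_toDigits (by norm_num) (by norm_num) hk, pvGood]
      by_cases h1 : k % 10 = 0 <;>
        by_cases h2 : (Nat.digits 10 k).reverse = Nat.digits 10 k <;>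
          by_cases h3 : (Nat.digits 2 k).reverse = Nat.digits 2 k <;>
            simp [h1, h2, h3]
  rw [hbody, PySem.List.foldl_append_if]
  simp only [List.nil_append]

-- ---- B-side: the reversal loops ----
lemma pvRev10_eq : ∀ t m, pvRev10 t m =
    m * 10 ^ (Nat.digits 10 t).length + Nat.ofDigits 10 (Nat.digits 10 t).reverse := by
  intro t
  induction t using Nat.strong_induction_on with
  | _ t ih =>
    intro m
    rw [pvRev10]
    by_cases h : t = 0
    · simp [h]
    · have hpos : 0 < t := Nat.pos_of_ne_zero h
      have hlt : t / 10 < t := Nat.div_lt_self hpos (by norm_num)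
      simp only [h, dif_neg, not_false_iff]
      rw [ih (t / 10) hlt, Nat.digits_def' (by norm_num : (1:Nat) < 10) hpos]
      simp only [List.reverse_cons, Nat.ofDigits_append, List.length_cons,
        List.length_reverse, Nat.ofDigits_singleton]
      ring

lemma pvRev2_eq : ∀ t m, pvRev2 t m =
    m * 2 ^ (Nat.digits 2 t).length + Nat.ofDigits 2 (Nat.digits 2 t).reverse := by
  intro t
  induction t using Nat.strong_induction_on with
  | _ t ih =>
    intro m
    rw [pvRev2]
    by_cases h : t = 0
    · simp [h]
    · have hpos : 0 < t := Nat.pos_of_ne_zero h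
      have hlt : t / 2 < t := Nat.div_lt_self hpos (by norm_num)
      simp only [h, dif_neg, not_false_iff]
      rw [ih (t / 2) hlt, Nat.digits_def' (by norm_num : (1:Nat) < 2) hpos]
      simp only [List.reverse_cons, Nat.ofDigits_append, List.length_cons,
        List.length_reverse, Nat.ofDigits_singleton]
      ring

lemma pvBinPal {p : Nat} (hp : p ≠ 0) :
    (pvRev2 p 0 == p) = decide ((Nat.digits 2 p).reverse = Nat.digits 2 p) := by
  have hb : (1:Nat) < 2 := one_lt_two
  have hpos : 0 < p := Nat.pos_of_ne_zero hp
  have hv : pvRev2 p 0 = Nat.ofDigits 2 (Nat.digits 2 p).reverse := by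
    rw [pvRev2_eq]; simp
  rw [Bool.eq_iff_iff]
  simp only [beq_iff_eq, decide_eq_true_eq]
  rw [hv]
  constructor
  · intro h
    rcases Nat.mod_two_eq_zero_or_one p with hpar | hpar
    · exfalso
      have hcons : Nat.digits 2 p = p % 2 :: Nat.digits 2 (p / 2) := Nat.digits_def' hb hpos
      rw [hpar] at hcons
      have hv2 : Nat.ofDigits 2 (Nat.digits 2 p).reverse
          = Nat.ofDigits 2 (Nat.digits 2 (p / 2)).reverse := by
        rw [hcons]; simp [Nat.ofDigits_append]
      have hlt : Nat.ofDigits 2 (Nat.digits 2 (p / 2)).reverse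
          < 2 ^ (Nat.digits 2 (p / 2)).length := by
        have := Nat.ofDigits_lt_base_pow_length (b := 2)
          (l := (Nat.digits 2 (p / 2)).reverse) hb
          (fun x hx => Nat.digits_lt_base hb (List.mem_reverse.mp hx))
        simpa using this
      have hge : 2 ^ (Nat.digits 2 (p / 2)).length ≤ p := by
        have hlen : (Nat.digits 2 (p / 2)).length < (Nat.digits 2 p).length := by
          rw [hcons]; simp
        exact (Nat.lt_digits_length_iff hb p).mp hlen
      omega
    · have hcons : Nat.digits 2 p = p % 2 :: Nat.digits 2 (p / 2) := Nat.digits_def' hb hpos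
      have hdig : Nat.digits 2 (Nat.ofDigits 2 (Nat.digits 2 p).reverse)
          = (Nat.digits 2 p).reverse := by
        refine Nat.digits_ofDigits 2 hb _
          (fun x hx => Nat.digits_lt_base hb (List.mem_reverse.mp hx)) (fun hh => ?_)
        rw [List.getLast_reverse]
        simp [hcons, hpar]
      rw [h] at hdig
      exact hdig.symm
  · intro h; rw [h, Nat.ofDigits_digits]

-- ---- B-side: the constructed palindrome ----
lemma pvLen_half {d half : Nat} (hlo : 10 ^ ((d + 1) / 2 - 1) ≤ half)
    (hhi : half < 10 ^ ((d + 1) / 2)) : (Nat.digits 10 half).length = (d + 1) / 2 := by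
  have hb : (1:Nat) < 10 := by norm_num
  have h1 : (Nat.digits 10 half).length ≤ (d + 1) / 2 := (Nat.digits_length_le_iff hb half).mpr hhi
  have h2 : (d + 1) / 2 - 1 < (Nat.digits 10 half).length := (Nat.lt_digits_length_iff hb half).mpr hlo
  omega

lemma pvDigits_palOf {d half : Nat} (hd : 1 ≤ d)
    (hlo : 10 ^ ((d + 1) / 2 - 1) ≤ half) (hhi : half < 10 ^ ((d + 1) / 2)) :
    Nat.digits 10 (pvPalOf d half) =
      ((Nat.digits 10 half).drop (d % 2)).reverse ++ Nat.digits 10 half := by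
  have hb : (1:Nat) < 10 := by norm_num
  have hone : 1 ≤ 10 ^ ((d + 1) / 2 - 1) := Nat.one_le_pow _ _ (by norm_num)
  have hhalf : half ≠ 0 := by omega
  have hH : Nat.digits 10 half ≠ [] := Nat.digits_ne_nil_iff_ne_zero.mpr hhalf
  have hlen : (Nat.digits 10 half).length = (d + 1) / 2 := pvLen_half hlo hhi
  have hdig_t : Nat.digits 10 (half / 10 ^ (d % 2)) = (Nat.digits 10 half).drop (d % 2) := by
    rw [Nat.self_div_pow_eq_ofDigits_drop _ _ (by norm_num)]
    rcases eq_or_ne ((Nat.digits 10 half).drop (d % 2)) [] with he | he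
    · rw [he]; simp
    · refine Nat.digits_ofDigits 10 hb _
        (fun x hx => Nat.digits_lt_base hb (List.mem_of_mem_drop hx)) (fun hne => ?_)
      rw [List.getLast_drop]
      exact Nat.getLast_digit_ne_zero 10 hhalf
  have hM : pvPalOf d half =
      Nat.ofDigits 10 (((Nat.digits 10 half).drop (d % 2)).reverse ++ Nat.digits 10 half) := by
    rw [Nat.ofDigits_append, pvPalOf, hdig_t]
    have hlenM : ((Nat.digits 10 half).drop (d % 2)).reverse.length = d / 2 := by
      simp only [List.length_reverse, List.length_drop, hlen]; omega
    rw [hlenM, Nat.ofDigits_digits]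
    ring
  rw [hM]
  apply Nat.digits_ofDigits 10 hb
  · intro x hx
    rcases List.mem_append.mp hx with hx | hx
    · exact Nat.digits_lt_base hb (List.mem_of_mem_drop (List.mem_reverse.mp hx))
    · exact Nat.digits_lt_base hb hx
  · intro hne
    rw [List.getLast_append]
    simp only [List.isEmpty_iff, hH, dite_false]
    exact Nat.getLast_digit_ne_zero 10 hhalf

lemma pvLen_palOf {d half : Nat} (hd : 1 ≤ d)
    (hlo : 10 ^ ((d + 1) / 2 - 1) ≤ half) (hhi : half < 10 ^ ((d + 1) / 2)) :
    (Nat.digits 10 (pvPalOf d half)).length = d := by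
  rw [pvDigits_palOf hd hlo hhi]
  have hlen : (Nat.digits 10 half).length = (d + 1) / 2 := pvLen_half hlo hhi
  simp only [List.length_append, List.length_reverse, List.length_drop, hlen]
  omega

lemma pvBounds_palOf {d half : Nat} (hd : 1 ≤ d)
    (hlo : 10 ^ ((d + 1) / 2 - 1) ≤ half) (hhi : half < 10 ^ ((d + 1) / 2)) :
    10 ^ (d - 1) ≤ pvPalOf d half ∧ pvPalOf d half < 10 ^ d := by
  have hb : (1:Nat) < 10 := by norm_num
  have hlen := pvLen_palOf hd hlo hhi
  constructor
  · exact (Nat.lt_digits_length_iff hb _).mp (by omega)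
  · exact (Nat.digits_length_le_iff hb _).mp (by omega)

lemma pvPal_palOf {d half : Nat} (hd : 1 ≤ d)
    (hlo : 10 ^ ((d + 1) / 2 - 1) ≤ half) (hhi : half < 10 ^ ((d + 1) / 2)) :
    (Nat.digits 10 (pvPalOf d half)).reverse = Nat.digits 10 (pvPalOf d half) := by
  rw [pvDigits_palOf hd hlo hhi]
  have hone : 1 ≤ 10 ^ ((d + 1) / 2 - 1) := Nat.one_le_pow _ _ (by norm_num)
  have hhalf : half ≠ 0 := by omega
  have hH : Nat.digits 10 half ≠ [] := Nat.digits_ne_nil_iff_ne_zero.mpr hhalf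
  rcases Nat.mod_two_eq_zero_or_one d with hpar | hpar
  · rw [hpar]
    simp [List.reverse_append]
  · rw [hpar]
    obtain ⟨a, T, hT⟩ : ∃ a T, Nat.digits 10 half = a :: T := by
      cases hc : Nat.digits 10 half with
      | nil => exact absurd hc hH
      | cons a T => exact ⟨a, T, rfl⟩
    rw [hT]
    simp [List.reverse_append]

lemma pvMod_palOf {d half : Nat} (hd : 1 ≤ d)
    (hlo : 10 ^ ((d + 1) / 2 - 1) ≤ half) (hhi : half < 10 ^ ((d + 1) / 2)) :
    pvPalOf d half % 10 ≠ 0 := by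
  have hb : (1:Nat) < 10 := by norm_num
  have hone : 1 ≤ 10 ^ (d - 1) := Nat.one_le_pow _ _ (by norm_num)
  have hpos : 0 < pvPalOf d half := by
    have := (pvBounds_palOf hd hlo hhi).1; omega
  have hpal := pvPal_palOf hd hlo hhi
  have hne : Nat.digits 10 (pvPalOf d half) ≠ [] :=
    Nat.digits_ne_nil_iff_ne_zero.mpr (by omega)
  have h1 : (Nat.digits 10 (pvPalOf d half)).getLast hne ≠ 0 :=
    Nat.getLast_digit_ne_zero 10 (by omega)
  have h2 : (Nat.digits 10 (pvPalOf d half)).head hne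
      = (Nat.digits 10 (pvPalOf d half)).getLast hne := by
    rw [List.getLast_eq_head_reverse]
    simp only [hpal]
  have hcons : Nat.digits 10 (pvPalOf d half)
      = pvPalOf d half % 10 :: Nat.digits 10 (pvPalOf d half / 10) :=
    Nat.digits_def' hb hpos
  have h3 : (Nat.digits 10 (pvPalOf d half)).head hne = pvPalOf d half % 10 := by
    simp only [hcons, List.head_cons]
  omega

lemma pvMono_palOf {d a b : Nat} (hd : 1 ≤ d) (hhi : a < 10 ^ ((d + 1) / 2)) (hab : a < b) :
    pvPalOf d a < pvPalOf d b := by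
  have hS : 0 < 10 ^ (d / 2) := Nat.one_le_pow _ _ (by norm_num)
  have hta : a / 10 ^ (d % 2) < 10 ^ (d / 2) := by
    rcases Nat.mod_two_eq_zero_or_one d with hpar | hpar
    · rw [hpar]
      have he : (d + 1) / 2 = d / 2 := by omega
      simpa [he] using hhi
    · rw [hpar]
      have he : (d + 1) / 2 - 1 = d / 2 := by omega
      rw [pow_one, Nat.div_lt_iff_lt_mul (by norm_num)]
      calc a < 10 ^ ((d + 1) / 2) := hhi
        _ = 10 ^ (d / 2) * 10 := by rw [← he, ← pow_succ]; congr 1; omega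
  have hlent : (Nat.digits 10 (a / 10 ^ (d % 2))).length ≤ d / 2 :=
    (Nat.digits_length_le_iff (by norm_num) _).mpr hta
  have hr : Nat.ofDigits 10 (Nat.digits 10 (a / 10 ^ (d % 2))).reverse < 10 ^ (d / 2) := by
    calc Nat.ofDigits 10 (Nat.digits 10 (a / 10 ^ (d % 2))).reverse
        < 10 ^ (Nat.digits 10 (a / 10 ^ (d % 2))).reverse.length :=
          Nat.ofDigits_lt_base_pow_length (by norm_num)
            (fun x hx => Nat.digits_lt_base (by norm_num) (List.mem_reverse.mp hx))
      _ ≤ 10 ^ (d / 2) := Nat.pow_le_pow_right (by norm_num) (by simpa using hlent)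
  unfold pvPalOf
  calc a * 10 ^ (d / 2) + Nat.ofDigits 10 (Nat.digits 10 (a / 10 ^ (d % 2))).reverse
      < (a + 1) * 10 ^ (d / 2) := by nlinarith
    _ ≤ b * 10 ^ (d / 2) := Nat.mul_le_mul_right _ (by omega)
    _ ≤ b * 10 ^ (d / 2) + Nat.ofDigits 10 (Nat.digits 10 (b / 10 ^ (d % 2))).reverse :=
        Nat.le_add_right _ _

lemma pvComplete {p : Nat} (hp : p ≠ 0)
    (hpal : (Nat.digits 10 p).reverse = Nat.digits 10 p) (_hmod : p % 10 ≠ 0) :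
    10 ^ (((Nat.digits 10 p).length + 1) / 2 - 1) ≤ p / 10 ^ ((Nat.digits 10 p).length / 2) ∧
    p / 10 ^ ((Nat.digits 10 p).length / 2) < 10 ^ (((Nat.digits 10 p).length + 1) / 2) ∧
    pvPalOf (Nat.digits 10 p).length (p / 10 ^ ((Nat.digits 10 p).length / 2)) = p := by
  have hb : (1:Nat) < 10 := by norm_num
  have hpos : 0 < p := Nat.pos_of_ne_zero hp
  have hne : Nat.digits 10 p ≠ [] := Nat.digits_ne_nil_iff_ne_zero.mpr hp
  have hd1 : 1 ≤ (Nat.digits 10 p).length := List.length_pos_iff.mpr hne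
  set L := Nat.digits 10 p with hL
  set d := L.length with hdd
  have hdig_half : Nat.digits 10 (p / 10 ^ (d / 2)) = L.drop (d / 2) := by
    rw [Nat.self_div_pow_eq_ofDigits_drop _ _ (by norm_num)]
    refine Nat.digits_ofDigits 10 hb _
      (fun x hx => Nat.digits_lt_base hb (List.mem_of_mem_drop hx)) (fun hh => ?_)
    rw [List.getLast_drop]
    exact Nat.getLast_digit_ne_zero 10 hp
  have hlenhalf : (Nat.digits 10 (p / 10 ^ (d / 2))).length = (d + 1) / 2 := by
    rw [hdig_half, List.length_drop, ← hdd]; omega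
  have hlo : 10 ^ ((d + 1) / 2 - 1) ≤ p / 10 ^ (d / 2) :=
    (Nat.lt_digits_length_iff hb _).mp (by omega)
  have hhi : p / 10 ^ (d / 2) < 10 ^ ((d + 1) / 2) :=
    (Nat.digits_length_le_iff hb _).mp (by omega)
  refine ⟨hlo, hhi, ?_⟩
  have hdig_pal := pvDigits_palOf (d := d) (half := p / 10 ^ (d / 2)) hd1 hlo hhi
  rw [hdig_half, List.drop_drop] at hdig_pal
  have hdd2 : d / 2 + d % 2 = (d + 1) / 2 := by omega
  rw [hdd2] at hdig_pal
  have htake : L.take (d / 2) = (L.drop ((d + 1) / 2)).reverse := by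
    conv_lhs => rw [← hpal]
    rw [List.take_reverse]
    congr 2
    rw [← hdd]; omega
  have hfin : Nat.digits 10 (pvPalOf d (p / 10 ^ (d / 2))) = Nat.digits 10 p := by
    rw [hdig_pal, ← htake, ← hL, List.take_append_drop]
  exact Nat.digits_inj_iff.mp hfin

-- ---- B-side: the loops ----
lemma pvP_eq (d half : Nat) :
    half * 10 ^ (d / 2) + pvRev10 (if d % 2 = 1 then half / 10 else half) 0 = pvPalOf d half := by
  rw [pvRev10_eq]
  unfold pvPalOf
  have ht : (if d % 2 = 1 then half / 10 else half) = half / 10 ^ (d % 2) := by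
    rcases Nat.mod_two_eq_zero_or_one d with hpar | hpar <;> simp [hpar]
  rw [ht]
  ring

lemma pvInner_eq (n d : Nat) :
    ∀ (hs : List Nat) (res : List Nat),
      hs.Pairwise (fun a b => pvPalOf d a ≤ pvPalOf d b) →
      pvInner n d hs res = res ++
        (hs.filter (fun a => decide (pvPalOf d a < n) &&
            (pvRev2 (pvPalOf d a) 0 == pvPalOf d a))).map (pvPalOf d) := by
  intro hs
  induction hs with
  | nil => intro res _; simp [pvInner]
  | cons half rest ih =>
    intro res hord
    have hrel : ∀ a ∈ rest, pvPalOf d half ≤ pvPalOf d a := (List.pairwise_cons.mp hord).1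
    have htail := (List.pairwise_cons.mp hord).2
    simp only [pvInner]
    rw [pvP_eq]
    by_cases hc : n ≤ pvPalOf d half
    · rw [if_pos hc]
      have hfilter : (half :: rest).filter (fun a => decide (pvPalOf d a < n) &&
          (pvRev2 (pvPalOf d a) 0 == pvPalOf d a)) = [] := by
        apply List.filter_eq_nil_iff.mpr
        intro a ha
        have hna : ¬ pvPalOf d a < n := by
          rcases List.mem_cons.mp ha with rfl | ha'
          · omega
          · have := hrel a ha'; omega
        simp [hna]
      rw [hfilter]; simp
    · have hc' : pvPalOf d half < n := by omega
      rw [if_neg hc]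
      cases hB : (pvRev2 (pvPalOf d half) 0 == pvPalOf d half) with
      | true =>
        rw [ih (res ++ [pvPalOf d half]) htail]
        simp [hc', hB]
      | false =>
        rw [ih res htail]
        simp [hB]

lemma pvInner_block (n d : Nat) (res : List Nat) (hd : 1 ≤ d) :
    pvInner n d
      (List.range' (10 ^ ((d + 1) / 2 - 1)) (10 ^ ((d + 1) / 2) - 10 ^ ((d + 1) / 2 - 1))) res
      = res ++ pvBlock n d := by
  have hle : 10 ^ ((d + 1) / 2 - 1) ≤ 10 ^ ((d + 1) / 2) :=
    Nat.pow_le_pow_right (by norm_num) (by omega)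
  have hord : (List.range' (10 ^ ((d + 1) / 2 - 1))
      (10 ^ ((d + 1) / 2) - 10 ^ ((d + 1) / 2 - 1))).Pairwise
      (fun a b => pvPalOf d a ≤ pvPalOf d b) := by
    refine List.Pairwise.imp_of_mem ?_ (List.pairwise_lt_range' 1)
    intro a b ha hb hab
    have ha' : a < 10 ^ ((d + 1) / 2) := by
      have := (List.mem_range'_1.mp ha).2
      omega
    exact le_of_lt (pvMono_palOf hd ha' hab)
  rw [pvInner_eq n d _ res hord]
  rfl

lemma pvBlock_mem {n d x : Nat} (hd : 1 ≤ d) :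
    x ∈ pvBlock n d ↔
      ∃ half, 10 ^ ((d + 1) / 2 - 1) ≤ half ∧ half < 10 ^ ((d + 1) / 2) ∧
        pvPalOf d half = x ∧ x < n ∧ (pvRev2 x 0 == x) = true := by
  have hle : 10 ^ ((d + 1) / 2 - 1) ≤ 10 ^ ((d + 1) / 2) :=
    Nat.pow_le_pow_right (by norm_num) (by omega)
  unfold pvBlock
  simp only [List.mem_map, List.mem_filter, List.mem_range'_1, Bool.and_eq_true,
    decide_eq_true_eq]
  constructor
  · rintro ⟨a, ⟨⟨hlo', hhi'⟩, hlt, hbin⟩, rfl⟩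
    exact ⟨a, hlo', by omega, rfl, hlt, hbin⟩
  · rintro ⟨half, hlo', hhi', rfl, hlt, hbin⟩
    exact ⟨half, ⟨⟨hlo', by omega⟩, hlt, hbin⟩, rfl⟩

lemma pvOuter_mem (n d : Nat) (res : List Nat) :
    1 ≤ d → ∀ x, x ∈ pvOuter n d res ↔
      x ∈ res ∨ ∃ d', d ≤ d' ∧ 10 ^ (d' - 1) < n ∧ x ∈ pvBlock n d' := by
  induction d, res using pvOuter.induct (n := n) with
  | case1 d res h ih =>
    intro hd x
    have h' : 10 ^ (d - 1) < n := h
    rw [pvOuter, dif_pos h']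
    rw [ih (by omega) x, pvInner_block n d res hd]
    constructor
    · rintro (hx | ⟨d', hd', hg, hbk⟩)
      · rcases List.mem_append.mp hx with hx | hx
        · exact Or.inl hx
        · exact Or.inr ⟨d, le_refl d, h', hx⟩
      · exact Or.inr ⟨d', by omega, hg, hbk⟩
    · rintro (hx | ⟨d', hd', hg, hbk⟩)
      · exact Or.inl (List.mem_append.mpr (Or.inl hx))
      · rcases eq_or_lt_of_le hd' with rfl | hlt
        · exact Or.inl (List.mem_append.mpr (Or.inr hbk))
        · exact Or.inr ⟨d', by omega, hg, hbk⟩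
  | case2 d res h =>
    intro hd x
    have h' : ¬ 10 ^ (d - 1) < n := h
    rw [pvOuter, dif_neg h']
    constructor
    · exact Or.inl
    · rintro (hx | ⟨d', hd', hg, hbk⟩)
      · exact hx
      · exfalso
        have : 10 ^ (d - 1) ≤ 10 ^ (d' - 1) := Nat.pow_le_pow_right (by norm_num) (by omega)
        omega

lemma pvOuter_pairwise (n d : Nat) (res : List Nat) :
    1 ≤ d → res.Pairwise (· < ·) → (∀ x ∈ res, x < 10 ^ (d - 1)) →
    (pvOuter n d res).Pairwise (· < ·) := by
  induction d, res using pvOuter.induct (n := n) with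
  | case1 d res h ih =>
    intro hd hres hbound
    have h' : 10 ^ (d - 1) < n := h
    rw [pvOuter, dif_pos h']
    refine ih (by omega) ?_ ?_
    · rw [pvInner_block n d res hd, List.pairwise_append]
      refine ⟨hres, ?_, ?_⟩
      · unfold pvBlock
        rw [List.pairwise_map]
        refine List.Pairwise.imp_of_mem ?_ (List.Pairwise.filter _ (List.pairwise_lt_range' 1))
        intro a b ha hb hab
        have ha' : a < 10 ^ ((d + 1) / 2) := by
          have h2 := (List.mem_range'_1.mp (List.mem_of_mem_filter ha)).2
          have hle : 10 ^ ((d + 1) / 2 - 1) ≤ 10 ^ ((d + 1) / 2) :=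
            Nat.pow_le_pow_right (by norm_num) (by omega)
          omega
        exact pvMono_palOf hd ha' hab
      · intro x hx y hy
        obtain ⟨half, hlo, hhi, rfl, _, _⟩ := (pvBlock_mem hd).mp hy
        have h1 := (pvBounds_palOf hd hlo hhi).1
        have h2 := hbound x hx
        omega
    · intro x hx
      rw [pvInner_block n d res hd] at hx
      have he : (d + 1) - 1 = d := by omega
      rcases List.mem_append.mp hx with hx | hx
      · have h2 := hbound x hx
        have hle : 10 ^ (d - 1) ≤ 10 ^ d := Nat.pow_le_pow_right (by norm_num) (by omega)
        rw [he]; omega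
      · obtain ⟨half, hlo, hhi, rfl, _, _⟩ := (pvBlock_mem hd).mp hx
        rw [he]
        exact (pvBounds_palOf hd hlo hhi).2
  | case2 d res h =>
    intro _ hres _
    have h' : ¬ 10 ^ (d - 1) < n := h
    rw [pvOuter, dif_neg h']
    exact hres

lemma pvB_mem (n x : Nat) : x ∈ pvOuter n 1 [] ↔ x < n ∧ pvGood x = true := by
  rw [pvOuter_mem n 1 [] (by norm_num) x]
  simp only [List.not_mem_nil, false_or]
  constructor
  · rintro ⟨d', hd', hg, hbk⟩
    obtain ⟨half, hlo, hhi, rfl, hxn, hbin⟩ := (pvBlock_mem hd').mp hbk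
    have hone : 1 ≤ 10 ^ (d' - 1) := Nat.one_le_pow _ _ (by norm_num)
    have hx0 : pvPalOf d' half ≠ 0 := by
      have := (pvBounds_palOf hd' hlo hhi).1; omega
    refine ⟨hxn, ?_⟩
    rw [pvGood]
    simp only [decide_eq_true_eq]
    refine ⟨pvMod_palOf hd' hlo hhi, pvPal_palOf hd' hlo hhi, ?_⟩
    have hbb := pvBinPal hx0
    rw [hbin] at hbb
    exact of_decide_eq_true hbb.symm
  · rintro ⟨hxn, hgood⟩
    rw [pvGood] at hgood
    simp only [decide_eq_true_eq] at hgood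
    obtain ⟨hmod, hpal, hbin⟩ := hgood
    have hx0 : x ≠ 0 := by rintro rfl; simp at hmod
    have hd1 : 1 ≤ (Nat.digits 10 x).length :=
      List.length_pos_iff.mpr (Nat.digits_ne_nil_iff_ne_zero.mpr hx0)
    obtain ⟨hlo, hhi, hpx⟩ := pvComplete hx0 hpal hmod
    refine ⟨(Nat.digits 10 x).length, hd1, ?_, ?_⟩
    · have : 10 ^ ((Nat.digits 10 x).length - 1) ≤ x :=
        (Nat.lt_digits_length_iff (by norm_num) x).mp (by omega)
      omega
    · rw [pvBlock_mem hd1]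
      refine ⟨x / 10 ^ ((Nat.digits 10 x).length / 2), hlo, hhi, hpx, hxn, ?_⟩
      rw [pvBinPal hx0]
      simp [hbin]

lemma pvB_eq_filter (n : Nat) : pvOuter n 1 [] = (List.range n).filter pvGood := by
  have h1 : (pvOuter n 1 []).Pairwise (· < ·) :=
    pvOuter_pairwise n 1 [] (by norm_num) (by simp) (by simp)
  have h2 : ((List.range n).filter pvGood).Pairwise (· < ·) :=
    List.Pairwise.filter _ List.pairwise_lt_range
  have hmem : ∀ a, a ∈ pvOuter n 1 [] ↔ a ∈ (List.range n).filter pvGood := by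
    intro a
    rw [pvB_mem, List.mem_filter, List.mem_range]
  have hperm : (pvOuter n 1 []).Perm ((List.range n).filter pvGood) :=
    (List.perm_ext_iff_of_nodup (h1.imp Nat.ne_of_lt) (h2.imp Nat.ne_of_lt)).mpr hmem
  exact List.Perm.eq_of_pairwise (fun a b _ _ hab hba => by omega)
    (h1.imp le_of_lt) (h2.imp le_of_lt) hperm

-- ===== VERDICT (by name: the statement is the Claim_ definition above) =====
theorem find_double_based_palindromes_spec : Claim_equal_find_double_based_palindromes := by
  intro n _
  unfold Spec_find_double_based_palindromes
  rw [pvA_eq, find_double_based_palindromes_alt, pvB_eq_filter]
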